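-- pv_equiv track=rewrite | github.com/vukrosic/ml-from-scratch | pytorch-internals/001-torch-compile/fusion.py | fuse_graph
-- ===== SOURCE A (Python) =====
-- def fuse_graph(graph):
--     fused = []
--     skip_next = set()           # indices to skip after a fusion
--
--     for i, (out, op, args) in enumerate(graph):
--         if i in skip_next:       # already fused into a previous op
--             continue
--
--         # Check if this matmul is followed by a relu on the same output
--         if op == "matmul" and i + 1 < len(graph):
--             next_out, next_op, next_args = graph[i + 1]
--             if next_op == "relu" and next_args[0] == out:
--                 # Merge: matmul + relu becomes one fused operation
--                 fused.append((next_out, "fused_matmul_relu", args))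
--                 skip_next.add(i + 1)    # skip the relu since it's merged
--                 continue
--
--         fused.append((out, op, args))
--
--     return fused
-- ===== SOURCE B (Python) =====
-- def fuse_graph(graph):
--     # Stage 1: pairwise zip precomputes which adjacent pairs fuse; a pair's
--     # second element is a relu, never a matmul, so fusable pairs cannot overlap.
--     pair_ok = [a[1] == "matmul" and b[1] == "relu" and b[2][0] == a[0]
--                for a, b in zip(graph, graph[1:])]
--     fuse_at = pair_ok + [False]
--     keep = [True] + [not p for p in pair_ok]
--     nexts = graph[1:] + [None]
--     # Stage 2: mask-driven emission, no mutable skip state.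
--     return [(nxt[0], "fused_matmul_relu", node[2]) if f else node
--             for node, f, k, nxt in zip(graph, fuse_at, keep, nexts) if f or k]
-- ===== Notes on version B (the rewrite author's own statement) =====
-- stated objective: alternative
-- what changed: Replaces A's single stateful scan with a mutable skip_next set by a staged pipeline: a pairwise zip of the graph with its own tail precomputes a fusion mask and a keep mask, and a second mask-driven comprehension over zip(graph, masks, next-nodes) emits the result with no mutable skip state; this is correct because the second element of a fusable pair is a relu and can never start another pair, so fusable pairs never overlap.
import Mathlib
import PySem

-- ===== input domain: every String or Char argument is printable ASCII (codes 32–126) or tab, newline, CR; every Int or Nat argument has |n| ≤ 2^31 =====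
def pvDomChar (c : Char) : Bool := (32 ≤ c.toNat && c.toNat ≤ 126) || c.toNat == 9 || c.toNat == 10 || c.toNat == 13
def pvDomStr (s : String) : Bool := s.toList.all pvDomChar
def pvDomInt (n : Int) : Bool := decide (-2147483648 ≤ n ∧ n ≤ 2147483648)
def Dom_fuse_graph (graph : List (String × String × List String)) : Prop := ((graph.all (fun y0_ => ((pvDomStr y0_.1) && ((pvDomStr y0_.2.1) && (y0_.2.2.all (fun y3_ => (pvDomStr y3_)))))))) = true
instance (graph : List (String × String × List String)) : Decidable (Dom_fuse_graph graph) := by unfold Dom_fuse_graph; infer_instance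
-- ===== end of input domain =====

-- B replaces A's stateful skip-set scan by a staged pipeline: a pairwise zip precomputes fusion/keep masks, then a mask-driven pass over zipped lists emits the result (alternative decomposition, same cost).


-- ===== PORT A =====
-- loop body of A's 'for i, (out, op, args) in enumerate(graph)', state = (fused, skip_next).
-- 'next_args[0] == out' is ported as 'pyGet? next_args 0 == some out': where Python raises IndexError
-- (empty next_args) the port takes the no-fusion branch; those inputs are excluded by Pre_ below.
def fuseStepA (graph : List (String × String × List String))
    (st : List (String × String × List String) × PySem.Set Int)
    (p : Int × (String × String × List String)) :
    List (String × String × List String) × PySem.Set Int :=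
  let (fused, skip) := st
  let (i, (out, op, args)) := p
  if PySem.Set.contains skip i then (fused, skip)
  else if op == "matmul" && decide (i + 1 < (graph.length : Int)) then
    match PySem.List.pyGet? graph (i + 1) with
    | some (next_out, next_op, next_args) =>
      if next_op == "relu" && (PySem.List.pyGet? next_args 0 == some out) then
        (fused ++ [(next_out, "fused_matmul_relu", args)], PySem.Set.add skip (i + 1))
      else (fused ++ [(out, op, args)], skip)
    | none => (fused ++ [(out, op, args)], skip)   -- unreachable: i + 1 < len(graph)
  else (fused ++ [(out, op, args)], skip)

def fuse_graph (graph : List (String × String × List String)) : List (String × String × List String) :=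
  ((PySem.List.enumerate graph 0).foldl (fuseStepA graph) ([], PySem.Set.empty)).1

-- ===== PORT B =====
-- the pairwise fusion predicate of B's first comprehension ('b[2][0] == a[0]' via pyGet?, as in port A)
def fuseOk (a b : String × String × List String) : Bool :=
  a.2.1 == "matmul" && b.2.1 == "relu" && (PySem.List.pyGet? b.2.2 0 == some a.1)

-- B: pair_ok via zip(graph, graph[1:]); masks fuse_at/keep; then a mask-driven pass over the zipped lists.
def fuse_graph_alt (graph : List (String × String × List String)) : List (String × String × List String) :=
  let pair_ok := (graph.zip (PySem.List.slice graph (some 1) none)).map (fun p => fuseOk p.1 p.2)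
  let fuse_at := pair_ok ++ [false]
  let keep := true :: pair_ok.map (!·)
  let nexts := (PySem.List.slice graph (some 1) none).map some ++ [none]
  (graph.zip (fuse_at.zip (keep.zip nexts))).foldl (fun acc q =>
    let (node, f, k, nxt) := q
    if f then
      match nxt with
      | some n => acc ++ [(n.1, "fused_matmul_relu", node.2.2)]
      | none => acc      -- unreachable: a fusable pair has a next node
    else if k then acc ++ [node] else acc) []

-- ===== PRECONDITION & SPEC =====
-- Pre_ excludes exactly the graphs where a "matmul" node is immediately followed by a "relu" node with an
-- empty argument list: there both Pythons raise IndexError on the relu's args[0].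
def Pre_fuse_graph (graph : List (String × String × List String)) : Prop :=
  ∀ p ∈ graph.zip graph.tail, ¬ (p.1.2.1 = "matmul" ∧ p.2.2.1 = "relu" ∧ p.2.2.2 = [])
instance (graph : List (String × String × List String)) : Decidable (Pre_fuse_graph graph) := by unfold Pre_fuse_graph; infer_instance
def pvWitness_fuse_graph : (List (String × String × List String)) :=
  [("a", "matmul", ["x", "w"]), ("b", "relu", ["a"]), ("c", "add", ["b", "x"])]

def Spec_fuse_graph (graph : List (String × String × List String)) (out : List (String × String × List String)) : Prop := out = fuse_graph_alt graph
instance (graph : List (String × String × List String)) (out : List (String × String × List String)) : Decidable (Spec_fuse_graph graph out) := by unfold Spec_fuse_graph; infer_instance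

-- ===== CLAIM (what is proved, stated in full; the proofs are below) =====
def Claim_equal_fuse_graph : Prop := ∀ (graph : List (String × String × List String)), Dom_fuse_graph graph → Pre_fuse_graph graph → Spec_fuse_graph graph (fuse_graph graph)

-- ===== LEMMAS AND PROOFS =====

-- common recursive characterisation both ports are reduced to
def fuseRec : List (String × String × List String) → List (String × String × List String)
  | [] => []
  | [x] => [x]
  | x :: y :: t =>
    if fuseOk x y then (y.1, "fused_matmul_relu", x.2.2) :: fuseRec t
    else x :: fuseRec (y :: t)

lemma contains_false_of_lt {s : PySem.Set Int} {k : Int}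
    (h : ∀ j ∈ s, j < k) : PySem.Set.contains s k = false := by
  simp only [PySem.Set.contains, List.contains_eq_mem, decide_eq_false_iff_not]
  intro hm
  exact absurd rfl (Int.ne_of_lt (h k hm))

lemma contains_add_self (s : PySem.Set Int) (x : Int) :
    PySem.Set.contains (PySem.Set.add s x) x = true := by
  simp only [PySem.Set.contains, List.contains_eq_mem, decide_eq_true_eq]
  exact (PySem.Set.mem_add s x x).mpr (Or.inr rfl)

-- A's loop invariant: processing the enumerated suffix of `graph` starting at index k, with every
-- index in `skip` below k, appends exactly fuseRec of that suffix.
lemma loop_eq (graph : List (String × String × List String)) :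
    ∀ (n : Nat) (l : List (String × String × List String)) (k : Nat)
      (acc : List (String × String × List String)) (skip : PySem.Set Int),
      l.length ≤ n → graph.drop k = l → (∀ j ∈ skip, j < (k : Int)) →
      ((PySem.List.enumerate l (k : Int)).foldl (fuseStepA graph) (acc, skip)).1
        = acc ++ fuseRec l := by
  intro n
  induction n with
  | zero =>
    intro l k acc skip hn hd _
    interval_cases hl : l.length
    rw [List.length_eq_zero_iff.mp hl]
    simp [PySem.List.enumerate, fuseRec]
  | succ n ih =>
    intro l k acc skip hn hd hs
    match l with
    | [] => simp [PySem.List.enumerate, fuseRec]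
    | [(out, op, args)] =>
      have hlen : graph.length = k + 1 := by
        have := congrArg List.length hd
        simp [List.length_drop] at this
        omega
      rw [PySem.List.enumerate_cons]
      simp only [List.foldl_cons, fuseStepA, contains_false_of_lt hs, Bool.false_eq_true, if_false]
      have hno : ((k : Int) + 1 < (graph.length : Int)) = False := by
        simp only [eq_iff_iff, iff_false]; push_cast [hlen]; omega
      simp only [hno, decide_false, Bool.and_false, Bool.false_eq_true, if_false,
        PySem.List.enumerate_nil, List.foldl_nil]
      simp [fuseRec]
    | (out, op, args) :: (next_out, next_op, next_args) :: t =>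
      have hk1 : graph.drop (k + 1) = (next_out, next_op, next_args) :: t := by
        have h2 := congrArg (List.drop 1) hd
        rw [List.drop_drop] at h2
        simpa [Nat.add_comm] using h2
      have hlen : k + 2 ≤ graph.length := by
        have := congrArg List.length hk1
        simp [List.length_drop] at this
        omega
      have hget : PySem.List.pyGet? graph ((k : Int) + 1) = some (next_out, next_op, next_args) := by
        have h1 : ((k : Int) + 1) = ((k + 1 : Nat) : Int) := by push_cast; ring
        rw [h1, PySem.List.pyGet?_natCast]
        have := congrArg (fun xs => xs[0]?) hk1
        simpa [List.getElem?_drop] using this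
      rw [PySem.List.enumerate_cons]
      simp only [List.foldl_cons, fuseStepA, contains_false_of_lt hs, Bool.false_eq_true, if_false]
      have hyes : (decide ((k : Int) + 1 < (graph.length : Int))) = true := by
        simp only [decide_eq_true_eq]; omega
      simp only [hyes, Bool.and_true, hget]
      by_cases hop : op = "matmul"
      · simp only [hop, beq_self_eq_true, if_true]
        by_cases hc : (next_op == "relu" && (PySem.List.pyGet? next_args 0 == some out)) = true
        · -- fusion: skip index k+1, recurse on t with start index k+2
          simp only [hc, if_true]
          rw [PySem.List.enumerate_cons, List.foldl_cons]
          simp only [fuseStepA, contains_add_self, if_true]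
          have h2 : ((k : Int) + 1 + 1) = ((k + 2 : Nat) : Int) := by push_cast; ring
          rw [h2, ih t (k + 2) _ _ (by simp at hn ⊢; omega)
            (by rw [show k + 2 = (k + 1) + 1 by ring, ← List.drop_drop, hk1]; rfl)
            (by intro j hj
                rcases (PySem.Set.mem_add skip ((k : Int) + 1) j).mp hj with h | h
                · have := hs j h; push_cast; omega
                · push_cast; omega)]
          simp [fuseRec, fuseOk, hc]
        · -- no fusion: recurse on the full tail with start index k+1
          simp only [hc, if_false, Bool.false_eq_true]
          have h1 : ((k : Int) + 1) = ((k + 1 : Nat) : Int) := by push_cast; ring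
          rw [h1, ih _ (k + 1) _ _ (by simp at hn ⊢; omega) hk1
            (by intro j hj; have := hs j hj; push_cast; omega)]
          simp only [fuseRec, fuseOk]
          simp [hc]
      · have hop' : (op == "matmul") = false := by simpa using hop
        simp only [hop', if_false, Bool.false_eq_true]
        have h1 : ((k : Int) + 1) = ((k + 1 : Nat) : Int) := by push_cast; ring
        rw [h1, ih _ (k + 1) _ _ (by simp at hn ⊢; omega) hk1
          (by intro j hj; have := hs j hj; push_cast; omega)]
        simp [fuseRec, fuseOk, hop]

-- ===== B-side lemmas =====

-- B's result as a recursion over the list carrying the head keep-flag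
def bRes : List (String × String × List String) → Bool → List (String × String × List String)
  | [], _ => []
  | [x], k0 => if k0 then [x] else []
  | x :: y :: t, k0 =>
    if fuseOk x y then (y.1, "fused_matmul_relu", x.2.2) :: bRes (y :: t) false
    else (if k0 then [x] else []) ++ bRes (y :: t) true

def bStep (acc : List (String × String × List String))
    (q : (String × String × List String) × Bool × Bool × Option (String × String × List String)) :
    List (String × String × List String) :=
  let (node, f, k, nxt) := q
  if f then
    match nxt with
    | some n => acc ++ [(n.1, "fused_matmul_relu", node.2.2)]
    | none => acc
  else if k then acc ++ [node] else acc

def pairOk (l : List (String × String × List String)) : List Bool :=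
  (l.zip l.tail).map (fun p => fuseOk p.1 p.2)

def Z (l : List (String × String × List String)) (k0 : Bool) :
    List ((String × String × List String) × Bool × Bool × Option (String × String × List String)) :=
  l.zip ((pairOk l ++ [false]).zip ((k0 :: (pairOk l).map (!·)).zip (l.tail.map some ++ [none])))

lemma foldB : ∀ (l : List (String × String × List String)) (k0 : Bool)
    (acc : List (String × String × List String)),
    (Z l k0).foldl bStep acc = acc ++ bRes l k0 := by
  intro l
  induction l with
  | nil => intro k0 acc; simp [Z, pairOk, bRes]
  | cons x rest ih =>
    intro k0 acc
    match rest with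
    | [] =>
      cases k0 <;> simp [Z, pairOk, bRes, bStep]
    | y :: t =>
      have hz : Z (x :: y :: t) k0
          = (x, fuseOk x y, k0, some y) :: Z (y :: t) (!(fuseOk x y)) := by
        simp [Z, pairOk]
      rw [hz, List.foldl_cons, ih]
      by_cases hf : fuseOk x y = true
      · simp [bStep, bRes, hf]
      · cases k0 <;> simp [bStep, bRes, hf]

lemma bRes_true : ∀ (n : Nat) (l : List (String × String × List String)),
    l.length ≤ n → bRes l true = fuseRec l := by
  intro n
  induction n with
  | zero =>
    intro l hn
    interval_cases hl : l.length
    rw [List.length_eq_zero_iff.mp hl]; rfl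
  | succ n ih =>
    intro l hn
    match l with
    | [] => rfl
    | [x] => rfl
    | x :: y :: t =>
      by_cases hf : fuseOk x y = true
      · -- y is a relu, so it can never start a fusable pair: bRes (y::t) false = fuseRec t
        have hy : y.2.1 = "relu" := by
          simp only [fuseOk, Bool.and_eq_true, beq_iff_eq] at hf
          exact hf.1.2
        have htail : bRes (y :: t) false = fuseRec t := by
          match t with
          | [] => rfl
          | z :: t' =>
            have hfy : fuseOk y z = false := by
              simp [fuseOk, hy]
            simp only [bRes, hfy, Bool.false_eq_true, if_false, List.nil_append]
            exact ih (z :: t') (by simp at hn ⊢; omega)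
        simp only [bRes, fuseRec, hf, if_true, htail]
      · simp only [bRes, fuseRec, hf, Bool.false_eq_true, if_false, if_true, List.singleton_append,
          List.cons.injEq, true_and]
        exact ih (y :: t) (by simp at hn ⊢; omega)

lemma alt_eq_fuseRec (graph : List (String × String × List String)) :
    fuse_graph_alt graph = fuseRec graph := by
  have h1 : PySem.List.slice graph (some 1) none = graph.tail := by
    have := PySem.List.slice_from_natCast graph 1
    simpa [List.drop_one] using this
  have h2 : fuse_graph_alt graph = (Z graph true).foldl bStep [] := by
    simp only [fuse_graph_alt, h1, Z, pairOk]
    rfl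
  rw [h2, foldB, bRes_true graph.length graph le_rfl]
  rfl

-- ===== VERDICT (by name: the statement is the Claim_ definition above) =====
theorem fuse_graph_spec : Claim_equal_fuse_graph := by
  intro graph _ _
  unfold Spec_fuse_graph fuse_graph
  rw [alt_eq_fuseRec]
  have := loop_eq graph graph.length graph 0 [] PySem.Set.empty le_rfl (by simp)
    (by intro j hj; simp [PySem.Set.empty] at hj)
  simpa using this
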